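-- pv_equiv track=rewrite | github.com/melinoe024/Parser | parser.py | dfa_state
-- ===== SOURCE A (Python) =====
-- dfa = {0:{'0':0, '1':1},
--        1:{'0':1, '1':2},
--        2:{'0':2, '1':0}}
--
-- def dfa_state(input_string):
--     state = 0
--
--     # for each element of input_string, if the current element is an arithmetic operation, change the state
--     # 0 -> 1, 1-> 2, 2-> 0
--     for i in input_string:
--         if i in ['+', '-', '*']:
--             state = dfa[state]['1']
--         else:
--             state = dfa[state]['0']
--
--     return state
-- ===== SOURCE B (Python) =====
-- def dfa_state(input_string):
--     return sum(1 for c in input_string if c in ('+', '-', '*')) % 3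
-- ===== Notes on version B (the rewrite author's own statement) =====
-- stated objective: simpler
-- what changed: Replaces the DFA state machine and transition table with a direct closed form: count the operator characters and take the count mod 3.
import Mathlib
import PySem

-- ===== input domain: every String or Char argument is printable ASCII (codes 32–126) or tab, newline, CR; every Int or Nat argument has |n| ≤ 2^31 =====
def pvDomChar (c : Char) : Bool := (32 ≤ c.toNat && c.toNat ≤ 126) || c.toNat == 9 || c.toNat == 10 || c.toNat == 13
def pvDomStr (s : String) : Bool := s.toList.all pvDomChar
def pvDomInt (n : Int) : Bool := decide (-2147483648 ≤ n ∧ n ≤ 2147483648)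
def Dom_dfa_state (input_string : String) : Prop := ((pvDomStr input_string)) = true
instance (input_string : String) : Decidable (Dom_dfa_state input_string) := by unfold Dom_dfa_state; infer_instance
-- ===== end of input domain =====

-- B replaces A's DFA transition table by counting operator characters mod 3 (objective: simpler).

-- ===== PORT A =====
-- the module-level dict `dfa`: outer keys 0,1,2; inner keys '0'/'1' (strings)
def pvDfaTable : PySem.Dict Int (PySem.Dict String Int) :=
  (PySem.Dict.empty
    |>.insert 0 (PySem.Dict.empty |>.insert "0" 0 |>.insert "1" 1)
    |>.insert 1 (PySem.Dict.empty |>.insert "0" 1 |>.insert "1" 2)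
    |>.insert 2 (PySem.Dict.empty |>.insert "0" 2 |>.insert "1" 0))

-- dfa[state]['1'] / dfa[state]['0']; the keys are always present on reachable states,
-- so getD with default 0 is exact here (get? would be `some` throughout).
def dfa_state (input_string : String) : Int :=
  input_string.toList.foldl
    (fun state i =>
      if i = '+' ∨ i = '-' ∨ i = '*' then
        (PySem.Dict.getD pvDfaTable state PySem.Dict.empty).getD "1" 0
      else
        (PySem.Dict.getD pvDfaTable state PySem.Dict.empty).getD "0" 0)
    0

-- ===== PORT B =====
def dfa_state_alt (input_string : String) : Int :=
  ((input_string.toList.countP (fun c => c = '+' ∨ c = '-' ∨ c = '*') : Int)) % 3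

-- ===== PRECONDITION & SPEC =====
def Spec_dfa_state (input_string : String) (out : Int) : Prop := out = dfa_state_alt input_string
instance (input_string : String) (out : Int) : Decidable (Spec_dfa_state input_string out) := by unfold Spec_dfa_state; infer_instance

-- ===== CLAIM (what is proved, stated in full; the proofs are below) =====
def Claim_equal_dfa_state : Prop := ∀ (input_string : String), Dom_dfa_state input_string → Spec_dfa_state input_string (dfa_state input_string)

-- ===== LEMMAS AND PROOFS =====

-- loop invariant: from any reachable state s ∈ {0,1,2}, A's fold ends at (s + operator-count) mod 3
theorem pvFold_eq_count (l : List Char) :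
    ∀ s : Int, (s = 0 ∨ s = 1 ∨ s = 2) →
      l.foldl
        (fun state i =>
          if i = '+' ∨ i = '-' ∨ i = '*' then
            (PySem.Dict.getD pvDfaTable state PySem.Dict.empty).getD "1" 0
          else
            (PySem.Dict.getD pvDfaTable state PySem.Dict.empty).getD "0" 0)
        s
      = (s + (l.countP (fun c => c = '+' ∨ c = '-' ∨ c = '*') : Int)) % 3 := by
  induction l with
  | nil =>
    rintro s (rfl | rfl | rfl) <;> decide
  | cons c l ih =>
    rintro s hs
    by_cases hc : c = '+' ∨ c = '-' ∨ c = '*'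
    · simp only [List.foldl_cons, List.countP_cons, decide_eq_true_eq, hc,
        if_true]
      rcases hs with rfl | rfl | rfl
      · have h1 : (PySem.Dict.getD pvDfaTable 0 PySem.Dict.empty).getD "1" 0 = (1 : Int) := by decide
        rw [h1, ih 1 (by decide)]; push_cast; omega
      · have h1 : (PySem.Dict.getD pvDfaTable 1 PySem.Dict.empty).getD "1" 0 = (2 : Int) := by decide
        rw [h1, ih 2 (by decide)]; push_cast; omega
      · have h1 : (PySem.Dict.getD pvDfaTable 2 PySem.Dict.empty).getD "1" 0 = (0 : Int) := by decide
        rw [h1, ih 0 (by decide)]; push_cast; omega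
    · simp only [List.foldl_cons, List.countP_cons, decide_eq_true_eq, hc,
        if_false]
      rcases hs with rfl | rfl | rfl
      · have h0 : (PySem.Dict.getD pvDfaTable 0 PySem.Dict.empty).getD "0" 0 = (0 : Int) := by decide
        rw [h0, ih 0 (by decide)]; push_cast; ring_nf
      · have h0 : (PySem.Dict.getD pvDfaTable 1 PySem.Dict.empty).getD "0" 0 = (1 : Int) := by decide
        rw [h0, ih 1 (by decide)]; push_cast; ring_nf
      · have h0 : (PySem.Dict.getD pvDfaTable 2 PySem.Dict.empty).getD "0" 0 = (2 : Int) := by decide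
        rw [h0, ih 2 (by decide)]; push_cast; ring_nf

-- ===== VERDICT (by name: the statement is the Claim_ definition above) =====
theorem dfa_state_spec : Claim_equal_dfa_state := by
  intro s _
  unfold Spec_dfa_state dfa_state dfa_state_alt
  rw [pvFold_eq_count _ 0 (by decide)]
  simp
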